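-- pv_equiv track=rewrite | github.com/nowling-lab/enhancer-dissection | clustal_highlighter/modules/highlights.py | _parse_indels
-- ===== SOURCE A (Python) =====
-- def _parse_indels(indel_fasta: dict) -> dict:
--     """Finds indels is passed indel fasta dictionry of names: sequences with indels imbedded
--
--     Args:
--         indel_fasta (dict): A fasta file with sequnces that have indels
--
--     Returns:
--         dict: An indel dictionary which has tuples of locations and -'s where indels are found. Keys are sequence names
--     """
--     indel_dict = {}
--     for sequence in indel_fasta:
--         indel_dict[sequence] = []
--         for index, character in enumerate(indel_fasta[sequence]):
--             if character == '-':
--                 indel_dict[sequence].append((index, character))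
--     return indel_dict
-- ===== SOURCE B (Python) =====
-- def _parse_indels(indel_fasta: dict) -> dict:
--     """Find gap ('-') positions per sequence using str.find to jump between gaps."""
--     indel_dict = {}
--     for sequence in indel_fasta:
--         seq = indel_fasta[sequence]
--         gaps = []
--         start = 0
--         while True:
--             pos = seq.find('-', start)
--             if pos == -1:
--                 break
--             gaps.append((pos, '-'))
--             start = pos + 1
--         indel_dict[sequence] = gaps
--     return indel_dict
-- ===== Notes on version B (the rewrite author's own statement) =====
-- stated objective: idiomatic
-- what changed: The inner per-character enumerate/if scan is replaced by a while loop that jumps directly between gap positions with str.find('-', start), appending (pos, '-') for each hit.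
import Mathlib
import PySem

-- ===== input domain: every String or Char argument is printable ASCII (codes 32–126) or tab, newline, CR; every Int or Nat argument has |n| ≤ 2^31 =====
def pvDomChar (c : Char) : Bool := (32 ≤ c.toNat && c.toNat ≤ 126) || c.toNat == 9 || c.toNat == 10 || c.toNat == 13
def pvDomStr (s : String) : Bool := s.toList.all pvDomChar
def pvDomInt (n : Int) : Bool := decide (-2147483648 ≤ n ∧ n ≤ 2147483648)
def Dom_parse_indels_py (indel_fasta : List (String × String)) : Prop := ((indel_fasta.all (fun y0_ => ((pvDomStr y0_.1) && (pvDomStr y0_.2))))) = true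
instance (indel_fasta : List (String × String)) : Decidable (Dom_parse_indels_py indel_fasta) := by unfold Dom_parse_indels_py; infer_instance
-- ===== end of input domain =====

-- B replaces the per-character enumerate scan with a str.find('-', start) loop that
-- jumps from one gap position to the next (same result, more idiomatic; not claimed faster).

-- ===== PORT A =====
-- dict parameter/result: PySem.Dict built from the association list; 'for sequence in indel_fasta' iterates its keys.
def parse_indels_py (indel_fasta : List (String × String)) : List (String × List (Int × String)) :=
  let fasta : PySem.Dict String String := PySem.Dict.ofList indel_fasta
  let indel_dict : PySem.Dict String (List (Int × String)) :=
    fasta.keys.foldl (fun d sequence =>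
      let d := d.insert sequence []
      (PySem.List.enumerate (fasta.getD sequence "").toList).foldl
        (fun d p => if p.2 = '-' then d.modify sequence [] (fun l => l ++ [(p.1, "-")]) else d) d)
      PySem.Dict.empty
  indel_dict.items

-- ===== PORT B =====
-- the 'while True: pos = seq.find('-', start); …' loop of Source B, as the obvious structural recursion on start
-- (seq.find('-', start) is PySem.Str.findFrom; the lemma below its uses justifies termination)
theorem pvFindFrom_of_gt (s sub : List Char) (k : Nat) (h : s.length < k) :
    PySem.Chars.findFrom s sub (k : Int) none = -1 := by
  simp only [PySem.Chars.findFrom]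
  have h1 : ¬ ((k : Int) < 0) := by omega
  have h2 : ((s.length : Int) < (k : Int)) := by exact_mod_cast h
  simp [h1, h2]

def pvFindGaps (seq : String) (start : Nat) : List (Int × String) :=
  let pos := PySem.Str.findFrom seq "-" (start : Int)
  if h : pos = -1 then []
  else (pos, "-") :: pvFindGaps seq (pos.toNat + 1)
termination_by seq.toList.length + 1 - start
decreasing_by
  by_cases hk : start ≤ seq.toList.length
  · have hs := (PySem.Chars.findFrom_natCast_spec seq.toList "-".toList start hk
      (by simpa [PySem.Str.findFrom] using h)).1
    simp only [PySem.Str.findFrom]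
    omega
  · exact absurd (by simpa [PySem.Str.findFrom] using
      pvFindFrom_of_gt seq.toList "-".toList start (by omega)) h

def parse_indels_py_alt (indel_fasta : List (String × String)) : List (String × List (Int × String)) :=
  let fasta : PySem.Dict String String := PySem.Dict.ofList indel_fasta
  let indel_dict : PySem.Dict String (List (Int × String)) :=
    fasta.keys.foldl (fun d sequence =>
      d.insert sequence (pvFindGaps (fasta.getD sequence "") 0))
      PySem.Dict.empty
  indel_dict.items

-- ===== PRECONDITION & SPEC =====
def Spec_parse_indels_py (indel_fasta : List (String × String)) (out : List (String × List (Int × String))) : Prop := out = parse_indels_py_alt indel_fasta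
instance (indel_fasta : List (String × String)) (out : List (String × List (Int × String))) : Decidable (Spec_parse_indels_py indel_fasta out) := by unfold Spec_parse_indels_py; infer_instance

-- ===== CLAIM (what is proved, stated in full; the proofs are below) =====
def Claim_equal_parse_indels_py : Prop := ∀ (indel_fasta : List (String × String)), Dom_parse_indels_py indel_fasta → Spec_parse_indels_py indel_fasta (parse_indels_py indel_fasta)

-- ===== LEMMAS AND PROOFS =====

-- reference form of the per-sequence gap list
def pvGapsSpec (cs : List Char) (off : Nat) : List (Int × String) :=
  match cs with
  | [] => []
  | c :: rest => if c = '-' then ((off : Int), "-") :: pvGapsSpec rest (off + 1) else pvGapsSpec rest (off + 1)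

theorem pvInsert_insert {ν : Type} (d : PySem.Dict String ν) (k : String) (a b : ν) :
    (d.insert k a).insert k b = d.insert k b := by
  apply PySem.Dict.ext
  rw [PySem.Dict.items_insert_of_contains _ b (PySem.Dict.contains_insert_self d k a)]
  rcases h : d.contains k with _ | _
  · rw [PySem.Dict.items_insert_of_not_contains _ a h,
        PySem.Dict.items_insert_of_not_contains _ b h]
    rw [List.map_append]
    congr 1
    · have hemb : ∀ p ∈ d.items, (fun p => if (p.1 == k) = true then (k, b) else p) p = id p := by
        intro p hp
        have hpk : p.1 ≠ k := by
          intro he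
          have : d.contains k = true := by
            rw [PySem.Dict.contains_iff_mem_keys]
            exact he ▸ List.mem_map_of_mem hp
          simp [this] at h
        simp [hpk]
      rw [List.map_congr_left hemb, List.map_id]
    · simp
  · rw [PySem.Dict.items_insert_of_contains _ a h,
        PySem.Dict.items_insert_of_contains _ b h, List.map_map]
    apply List.map_congr_left
    intro p _
    by_cases hpk : p.1 = k <;> simp [hpk]

theorem pvModify_insert {ν : Type} (d : PySem.Dict String ν) (k : String) (a dflt : ν) (f : ν → ν) :
    (d.insert k a).modify k dflt f = d.insert k (f a) := by
  rw [PySem.Dict.modify, PySem.Dict.getD_insert_self, pvInsert_insert]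

-- A's inner append loop, run from a dict whose value at k is acc
theorem pvInnerFold (l : List (Int × Char)) (d : PySem.Dict String (List (Int × String)))
    (k : String) (acc : List (Int × String)) :
    l.foldl (fun d p => if p.2 = '-' then d.modify k [] (fun t => t ++ [(p.1, "-")]) else d)
        (d.insert k acc)
      = d.insert k (acc ++ (l.filter (fun p => p.2 = '-')).map (fun p => (p.1, "-"))) := by
  induction l generalizing acc with
  | nil => simp
  | cons p rest ih =>
    by_cases hp : p.2 = '-'
    · rw [List.foldl_cons, if_pos hp, pvModify_insert, ih]
      simp [hp]
    · rw [List.foldl_cons, if_neg hp, ih]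
      simp [hp]

theorem pvEnumGaps (cs : List Char) (off : Nat) :
    ((PySem.List.enumerate cs (off : Int)).filter (fun p => p.2 = '-')).map (fun p => (p.1, "-"))
      = pvGapsSpec cs off := by
  induction cs generalizing off with
  | nil => simp [pvGapsSpec, PySem.List.enumerate_nil]
  | cons c rest ih =>
    rw [PySem.List.enumerate_cons, pvGapsSpec]
    by_cases hc : c = '-'
    · have := ih (off + 1)
      simp only [List.filter_cons, decide_eq_true hc]
      push_cast at this ⊢
      simp [hc, this]
    · have := ih (off + 1)
      simp only [List.filter_cons]
      push_cast at this ⊢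
      simp [hc, this]

theorem pvGapsSpec_nil_of_no_dash (cs : List Char) (off : Nat) (h : '-' ∉ cs) :
    pvGapsSpec cs off = [] := by
  induction cs generalizing off with
  | nil => rfl
  | cons c rest ih =>
    rw [pvGapsSpec]
    have hc : c ≠ '-' := fun he => h (he ▸ List.mem_cons_self)
    simp [hc, ih (off + 1) (fun hm => h (List.mem_cons_of_mem _ hm))]

theorem pvGapsSpec_first (cs : List Char) (off j : Nat)
    (h1 : ∀ i, i < j → cs[i]? ≠ some '-') (h2 : cs[j]? = some '-') :
    pvGapsSpec cs off = (((off + j : Nat) : Int), "-") :: pvGapsSpec (cs.drop (j + 1)) (off + j + 1) := by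
  induction cs generalizing j off with
  | nil => simp at h2
  | cons c rest ih =>
    cases j with
    | zero =>
      simp at h2
      rw [pvGapsSpec]
      simp [h2]
    | succ j =>
      have hc : c ≠ '-' := by
        have := h1 0 (Nat.succ_pos j)
        simpa using this
      rw [pvGapsSpec]
      simp only [hc]
      have := ih (off + 1) j (fun i hi => by
          have := h1 (i + 1) (by omega)
          simpa using this)
        (by simpa using h2)
      rw [this, List.drop_succ_cons]
      have e : off + 1 + j = off + (j + 1) := by omega
      rw [e]
      simp

-- singleton infix iff membership
theorem pvSingleton_infix_iff (a : Char) (l : List Char) : [a] <:+: l ↔ a ∈ l := by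
  constructor
  · intro h
    exact List.Sublist.mem (List.mem_singleton_self a) h.sublist
  · intro h
    obtain ⟨s, t, rfl⟩ := List.append_of_mem h
    exact ⟨s, t, by simp⟩

-- the find loop computes the reference gap list
theorem pvFindGaps_eq (seq : String) (start : Nat) (hk : start ≤ seq.toList.length) :
    pvFindGaps seq start = pvGapsSpec (seq.toList.drop start) start := by
  rw [pvFindGaps]
  set pos := PySem.Str.findFrom seq "-" (start : Int) with hpos
  have hposC : pos = PySem.Chars.findFrom seq.toList ['-'] (start : Int) none := by
    simp [hpos, PySem.Str.findFrom]
  by_cases h : pos = -1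
  · rw [dif_pos h]
    have hnf : ¬ (['-'] <:+: seq.toList.drop start) := by
      rw [← PySem.Chars.findFrom_natCast_eq_neg_one_iff seq.toList ['-'] start hk, ← hposC]
      exact h
    rw [pvGapsSpec_nil_of_no_dash _ _ (fun hm => hnf ((pvSingleton_infix_iff _ _).mpr hm))]
  · rw [dif_neg h]
    have hs := PySem.Chars.findFrom_natCast_spec seq.toList ['-'] start hk (hposC ▸ h)
    rw [← hposC] at hs
    obtain ⟨hle, hpre, hmin⟩ := hs
    have hposnn : 0 ≤ pos := le_trans (by omega) hle
    have hj : pos.toNat < seq.toList.length := by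
      obtain ⟨t, ht⟩ := hpre
      have : seq.toList.drop pos.toNat ≠ [] := by
        intro he; rw [he] at ht; simp at ht
      have := List.length_drop (l := seq.toList) (i := pos.toNat) ▸
        List.length_pos_iff.mpr this
      omega
    have hstart : start ≤ pos.toNat := by omega
    have hget : (seq.toList.drop start)[pos.toNat - start]? = some '-' := by
      rw [List.getElem?_drop]
      obtain ⟨t, ht⟩ := hpre
      have : seq.toList.drop pos.toNat = '-' :: t := ht.symm
      have hh := List.head?_drop (l := seq.toList) (i := pos.toNat)
      rw [this] at hh
      rw [show start + (pos.toNat - start) = pos.toNat by omega]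
      exact hh.symm
    have hmin' : ∀ i, i < pos.toNat - start → (seq.toList.drop start)[i]? ≠ some '-' := by
      intro i hi he
      apply hmin (start + i) (by omega) (by omega)
      rw [List.getElem?_drop] at he
      have hh := List.head?_drop (l := seq.toList) (i := start + i)
      rw [he] at hh
      cases hdr : seq.toList.drop (start + i) with
      | nil => rw [hdr] at hh; simp at hh
      | cons c t =>
        rw [hdr] at hh
        simp at hh
        exact ⟨t, by simp [hh]⟩
    rw [pvGapsSpec_first _ start (pos.toNat - start) hmin' hget]
    have he1 : start + (pos.toNat - start) = pos.toNat := by omega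
    rw [he1]
    have he2 : ((pos.toNat : Nat) : Int) = pos := by omega
    rw [List.drop_drop, pvFindGaps_eq seq (pos.toNat + 1) (by omega)]
    rw [show start + (pos.toNat - start + 1) = pos.toNat + 1 from by omega, he2]
termination_by seq.toList.length + 1 - start
decreasing_by omega

-- ===== VERDICT (by name: the statement is the Claim_ definition above) =====
-- per-key step of A equals per-key step of B
theorem pvStep_eq (fasta : PySem.Dict String String)
    (d : PySem.Dict String (List (Int × String))) (sequence : String) :
    (PySem.List.enumerate (fasta.getD sequence "").toList).foldl
        (fun d p => if p.2 = '-' then d.modify sequence [] (fun l => l ++ [(p.1, "-")]) else d)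
        (d.insert sequence [])
      = d.insert sequence (pvFindGaps (fasta.getD sequence "") 0) := by
  rw [pvInnerFold, pvFindGaps_eq _ 0 (Nat.zero_le _), List.drop_zero]
  rw [show ((0 : Int) = ((0 : Nat) : Int)) from rfl, pvEnumGaps]
  simp

-- ===== VERDICT (by name: the statement is the Claim_ definition above) =====
theorem parse_indels_py_spec : Claim_equal_parse_indels_py := by
  intro indel_fasta _
  unfold Spec_parse_indels_py parse_indels_py parse_indels_py_alt
  simp only [pvStep_eq]
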